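-- pv_equiv track=rewrite | github.com/Hannah-Zhang0725/pythonProject1 | lmps.py | maximum_planar_subset
-- ===== SOURCE A (Python) =====
-- def print_chords(labels, dp, i, j):
--     result = []
--     if i>=j:
--         return result
--     if labels[i] == labels[j] and dp[i][j] == dp[i + 1][j - 1] + 1:
--         result.append((i,j))
--         result.extend(print_chords(labels, dp, i + 1, j - 1))
--     elif dp[i][j] == dp[i][j - 1]:
--         result.extend(print_chords(labels, dp, i, j - 1))
--     else:
--         for k in range(i, j):
--             if labels[k] == labels[j] and dp[i][j] == dp[i][k - 1] + dp[k + 1][j - 1] + 1: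
--                 result.extend(print_chords(labels, dp, i, k - 1))
--                 result.append((k,j))
--                 result.extend(print_chords(labels, dp, k + 1, j - 1))
--                 break
--     return result
--
-- def maximum_planar_subset(num_nodes, labels):
--     # implementation for mps task goes here
--     # Return a tuple (size_of_subset, subset_edges)
--     #initialization
--     dp = [[0] * num_nodes for _ in range(num_nodes)]
--     memo = [[] * num_nodes for _ in range(num_nodes*num_nodes)]
--     for j in range(num_nodes):
--         label_j = labels[j]
--         temp = []
--         pos = 0
--         for k in range(num_nodes):
--             if label_j == labels[k] and k != j:
--                 temp.append(k)
--
--         for i in range(j):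
--
--             if temp == []:
--                 dp[i][j] = dp[i][j - 1]
--
--             else:
--                 for k in temp:
--                     #case1: k is not in (i,j)
--                     if k < i or k > j:
--                         dp[i][j] = max(dp[i][j - 1],dp[i][j])
--                     #case2
--                     elif k == i:
--                         if i == j - 1:
--                             dp[i][j] = 1
--                         else:
--                             dp[i][j] = max(dp[i + 1][j - 1] + 1, dp[i][j])
--                     #case3
--                     else:
--                         if dp[i][j - 1] <= dp[i][k - 1] + dp[k + 1][j - 1]:
--                                 dp[i][j] = max(dp[i][k - 1] + dp[k + 1][j - 1] + 1, dp[i][j])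
--                         else:
--                             dp[i][j] = max(dp[i][j], dp[i][j - 1])
--
--     result = print_chords(labels, dp, 0, num_nodes - 1)
--     return dp[0][num_nodes - 1], result
-- ===== SOURCE B (Python) =====
-- def _cell(dp, i, j, temp):
--     best = dp[i][j]
--     if not temp:
--         return dp[i][j - 1]
--     for k in temp:
--         if k < i or k > j:
--             best = max(dp[i][j - 1], best)
--         elif k == i:
--             best = 1 if i == j - 1 else max(dp[i + 1][j - 1] + 1, best)
--         else:
--             s = dp[i][k - 1] + dp[k + 1][j - 1]
--             if dp[i][j - 1] <= s:
--                 best = max(s + 1, best)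
--             else:
--                 best = max(best, dp[i][j - 1])
--     return best
--
--
-- def _traceback(labels, dp, i0, j0):
--     result = []
--     stack = [('i', i0, j0)]
--     while stack:
--         tag, a, b = stack.pop()
--         if tag == 'e':
--             result.append((a, b))
--             continue
--         i, j = a, b
--         if i >= j:
--             continue
--         if labels[i] == labels[j] and dp[i][j] == dp[i + 1][j - 1] + 1:
--             result.append((i, j))
--             stack.append(('i', i + 1, j - 1))
--         elif dp[i][j] == dp[i][j - 1]:
--             stack.append(('i', i, j - 1))
--         else:
--             for k in range(i, j):
--                 if labels[k] == labels[j] and dp[i][j] == dp[i][k - 1] + dp[k + 1][j - 1] + 1: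
--                     stack.append(('i', k + 1, j - 1))
--                     stack.append(('e', k, j))
--                     stack.append(('i', i, k - 1))
--                     break
--     return result
--
--
-- def maximum_planar_subset(num_nodes, labels):
--     dp = [[0] * num_nodes for _ in range(num_nodes)]
--     pos = {}
--     for k in range(num_nodes):
--         pos.setdefault(labels[k], []).append(k)
--     for l in range(2, num_nodes + 1):
--         for i in range(num_nodes - l + 1):
--             j = i + l - 1
--             temp = [k for k in pos.get(labels[j], []) if k != j]
--             dp[i][j] = _cell(dp, i, j, temp)
--     return dp[0][num_nodes - 1], _traceback(labels, dp, 0, num_nodes - 1)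
-- ===== Notes on version B (the rewrite author's own statement) =====
-- stated objective: alternative
-- what changed: The DP table is filled by increasing interval length (instead of column-by-column) with a positions-index dict replacing the per-column O(n) partner scan, the cell update is factored into a helper, and the recursive traceback is replaced by an iterative explicit-stack traceback that interleaves edge-emission items to reproduce the recursion's output order exactly.
import Mathlib
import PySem

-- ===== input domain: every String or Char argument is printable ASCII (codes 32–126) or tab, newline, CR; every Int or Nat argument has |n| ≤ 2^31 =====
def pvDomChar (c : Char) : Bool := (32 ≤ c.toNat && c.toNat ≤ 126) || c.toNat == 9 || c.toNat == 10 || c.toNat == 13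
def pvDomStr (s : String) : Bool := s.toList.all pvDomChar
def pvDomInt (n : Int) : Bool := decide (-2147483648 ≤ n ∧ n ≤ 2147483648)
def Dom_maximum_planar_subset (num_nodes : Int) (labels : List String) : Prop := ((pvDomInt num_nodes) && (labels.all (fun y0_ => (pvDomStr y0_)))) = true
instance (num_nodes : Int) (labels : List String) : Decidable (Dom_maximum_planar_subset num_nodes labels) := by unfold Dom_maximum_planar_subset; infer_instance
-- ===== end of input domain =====

-- B replaces A's recursive traceback by an explicit-stack iterative traceback and fills the DP
-- table by increasing interval length using a precomputed positions index (alternative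
-- decomposition, same asymptotic cost). Equivalence of the RETURN value is proved on Pre_.

-- shared small helpers (same-line constructs of both Pythons)
def pvLab (labels : List String) (i : Int) : String := PySem.List.pyGetD labels i ""  -- labels[i]; in range under Pre_
-- dp[i][j] read / dp[i][j] = v write on the n×n table; pyGetD/pySetD are Python-exact
-- (negative index wraps from the end), the defaults are unreachable on the accesses performed
def pvGet (dp : List (List Int)) (i j : Int) : Int :=
  PySem.List.pyGetD (PySem.List.pyGetD dp i []) j 0
def pvSet (dp : List (List Int)) (i j v : Int) : List (List Int) :=
  PySem.List.pySetD dp i (PySem.List.pySetD (PySem.List.pyGetD dp i []) j v)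
-- the `for k in range(i, j): if labels[k]==labels[j] and dp[i][j]==dp[i][k-1]+dp[k+1][j-1]+1: …; break`
-- scan (first matching k), identical lines in A's print_chords and B's traceback:
def pvSplitFind (labels : List String) (dp : List (List Int)) (i j : Int) : Option Int :=
  (PySem.List.pyRange i j 1).find? (fun k =>
    decide (pvLab labels k = pvLab labels j) &&
    decide (pvGet dp i j = pvGet dp i (k - 1) + pvGet dp (k + 1) (j - 1) + 1))

-- ===== PORT A ===== (part 1: print_chords; the DP fill and entry point follow)
-- print_chords, the recursive traceback of A. The extra `fuel` argument only makes the
-- recursion structural (Lean totality guard): it strictly exceeds the recursion depth at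
-- every reachable call, so the 0-case is never hit from the entry point below.
def pvChordsA (labels : List String) (dp : List (List Int)) :
    Nat → Int → Int → List (Int × Int)
  | 0, _, _ => []
  | fuel + 1, i, j =>
    if i ≥ j then []
    else if pvLab labels i = pvLab labels j ∧ pvGet dp i j = pvGet dp (i + 1) (j - 1) + 1 then
      (i, j) :: pvChordsA labels dp fuel (i + 1) (j - 1)
    else if pvGet dp i j = pvGet dp i (j - 1) then pvChordsA labels dp fuel i (j - 1)
    else
      match pvSplitFind labels dp i j with
      | some k =>
          pvChordsA labels dp fuel i (k - 1) ++ (k, j) :: pvChordsA labels dp fuel (k + 1) (j - 1)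
      | none => []

-- temp = [k for k in range(num_nodes) if labels[j] == labels[k] and k != j]  (A's per-column scan)
def pvTempA (n : Int) (labels : List String) (j : Int) : List Int :=
  let labelJ := pvLab labels j
  (PySem.List.pyRange 0 n 1).foldl
    (fun temp k => if labelJ = pvLab labels k ∧ k ≠ j then temp ++ [k] else temp) []

-- the DP fill of A: for j in range(n): for i in range(j): update dp[i][j] via the k-loop over temp
-- (the unused `memo` list and `pos = 0` of the Python are dead code and not ported)
def pvFillA (n : Int) (labels : List String) : List (List Int) :=
  (PySem.List.pyRange 0 n 1).foldl
    (fun dp j =>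
      let temp := pvTempA n labels j
      (PySem.List.pyRange 0 j 1).foldl
        (fun dp i =>
          pvSet dp i j
            (if temp = [] then pvGet dp i (j - 1)
             else temp.foldl
               (fun acc k =>
                 if k < i ∨ j < k then max (pvGet dp i (j - 1)) acc
                 else if k = i then
                   (if i = j - 1 then 1 else max (pvGet dp (i + 1) (j - 1) + 1) acc)
                 else if pvGet dp i (j - 1) ≤ pvGet dp i (k - 1) + pvGet dp (k + 1) (j - 1) then
                   max (pvGet dp i (k - 1) + pvGet dp (k + 1) (j - 1) + 1) acc
                 else max acc (pvGet dp i (j - 1)))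
               (pvGet dp i j)))
        dp)
    (List.replicate n.toNat (List.replicate n.toNat 0))

def maximum_planar_subset (num_nodes : Int) (labels : List String) : Int × (List (Int × Int)) :=
  let dp := pvFillA num_nodes labels
  (pvGet dp 0 (num_nodes - 1), pvChordsA labels dp ((num_nodes - 1).toNat + 1) 0 (num_nodes - 1))

-- ===== PORT B =====
-- pos: one pass building {label: [positions in ascending order]}
def pvPosB (n : Int) (labels : List String) : PySem.Dict String (List Int) :=
  (PySem.List.pyRange 0 n 1).foldl
    (fun d k => d.insert (pvLab labels k) (d.getD (pvLab labels k) [] ++ [k])) PySem.Dict.empty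

-- temp = [k for k in pos.get(labels[j], []) if k != j]
def pvTempB (labels : List String) (pos : PySem.Dict String (List Int)) (j : Int) : List Int :=
  (pos.getD (pvLab labels j) []).filter (fun k => decide (k ≠ j))

-- _cell(dp, i, j, temp): the per-cell update rule, as a helper
def pvCellB (dp : List (List Int)) (temp : List Int) (i j : Int) : Int :=
  let best := pvGet dp i j
  if temp = [] then pvGet dp i (j - 1)
  else temp.foldl
    (fun best k =>
      if k < i ∨ j < k then max (pvGet dp i (j - 1)) best
      else if k = i then
        (if i = j - 1 then 1 else max (pvGet dp (i + 1) (j - 1) + 1) best)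
      else
        let s := pvGet dp i (k - 1) + pvGet dp (k + 1) (j - 1)
        if pvGet dp i (j - 1) ≤ s then max (s + 1) best else max best (pvGet dp i (j - 1)))
    best

-- the DP fill of B: by increasing interval length l, j = i + l - 1
def pvFillB (n : Int) (labels : List String) : List (List Int) :=
  let pos := pvPosB n labels
  (PySem.List.pyRange 2 (n + 1) 1).foldl
    (fun dp l =>
      (PySem.List.pyRange 0 (n - l + 1) 1).foldl
        (fun dp i =>
          let j := i + l - 1
          pvSet dp i j (pvCellB dp (pvTempB labels pos j) i j))
        dp)
    (List.replicate n.toNat (List.replicate n.toNat 0))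

-- stack items of the iterative traceback: ('i', i, j) intervals and ('e', a, b) edge emissions
inductive pvItem where
  | iv : Int → Int → pvItem
  | ed : Int → Int → pvItem
deriving DecidableEq, Repr

-- _traceback: while stack: pop; edges are appended to result, intervals expand by the
-- same three branches as A's recursion (stack top = list head here). `fuel` bounds the
-- number of loop iterations (totality guard only; it exceeds the bound at the call below).
def pvTrace (labels : List String) (dp : List (List Int)) :
    Nat → List pvItem → List (Int × Int) → List (Int × Int)
  | 0, _, res => res
  | _ + 1, [], res => res
  | fuel + 1, .ed a b :: rest, res => pvTrace labels dp fuel rest (res ++ [(a, b)])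
  | fuel + 1, .iv i j :: rest, res =>
    if i ≥ j then pvTrace labels dp fuel rest res
    else if pvLab labels i = pvLab labels j ∧ pvGet dp i j = pvGet dp (i + 1) (j - 1) + 1 then
      pvTrace labels dp fuel (.iv (i + 1) (j - 1) :: rest) (res ++ [(i, j)])
    else if pvGet dp i j = pvGet dp i (j - 1) then
      pvTrace labels dp fuel (.iv i (j - 1) :: rest) res
    else
      match pvSplitFind labels dp i j with
      | some k =>
          pvTrace labels dp fuel (.iv i (k - 1) :: .ed k j :: .iv (k + 1) (j - 1) :: rest) res
      | none => pvTrace labels dp fuel rest res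

def maximum_planar_subset_alt (num_nodes : Int) (labels : List String) :
    Int × (List (Int × Int)) :=
  let dp := pvFillB num_nodes labels
  (pvGet dp 0 (num_nodes - 1),
    pvTrace labels dp (5 * (num_nodes - 1).toNat + 3) [.iv 0 (num_nodes - 1)] [])

-- ===== PRECONDITION & SPEC =====
-- Pre_ excludes exactly the inputs where Python A raises: num_nodes < 1 (dp[0][num_nodes-1]
-- is an IndexError) or labels shorter than num_nodes (labels[j] is an IndexError).
def Pre_maximum_planar_subset (num_nodes : Int) (labels : List String) : Prop :=
  1 ≤ num_nodes ∧ num_nodes ≤ (labels.length : Int)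
instance (num_nodes : Int) (labels : List String) : Decidable (Pre_maximum_planar_subset num_nodes labels) := by unfold Pre_maximum_planar_subset; infer_instance
def pvWitness_maximum_planar_subset : Int × List String := (3, ["a", "b", "a"])

def Spec_maximum_planar_subset (num_nodes : Int) (labels : List String) (out : Int × (List (Int × Int))) : Prop := out = maximum_planar_subset_alt num_nodes labels
instance (num_nodes : Int) (labels : List String) (out : Int × (List (Int × Int))) : Decidable (Spec_maximum_planar_subset num_nodes labels out) := by unfold Spec_maximum_planar_subset; infer_instance

-- ===== CLAIM (what is proved, stated in full; the proofs are below) =====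
def Claim_equal_maximum_planar_subset : Prop := ∀ (num_nodes : Int) (labels : List String), Dom_maximum_planar_subset num_nodes labels → Pre_maximum_planar_subset num_nodes labels → Spec_maximum_planar_subset num_nodes labels (maximum_planar_subset num_nodes labels)

-- ===== LEMMAS AND PROOFS =====

-- ---------- the per-cell update rule over an abstract table function ----------
def cellS (f : Int → Int → Int) (temp : List Int) (i j : Int) : Int :=
  if temp = [] then f i (j - 1)
  else temp.foldl
    (fun acc k =>
      if k < i ∨ j < k then max (f i (j - 1)) acc
      else if k = i then (if i = j - 1 then 1 else max (f (i + 1) (j - 1) + 1) acc)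
      else if f i (j - 1) ≤ f i (k - 1) + f (k + 1) (j - 1) then
        max (f i (k - 1) + f (k + 1) (j - 1) + 1) acc
      else max acc (f i (j - 1)))
    0

theorem cellB_eq_cellS (dp : List (List Int)) (temp : List Int) (i j : Int)
    (h0 : pvGet dp i j = 0) :
    pvCellB dp temp i j = cellS (fun a b => pvGet dp a b) temp i j := by
  simp only [pvCellB, cellS, h0]

theorem cellS_congr {f g : Int → Int → Int} {temp : List Int} {i j : Int}
    (hi : 0 ≤ i) (hij : i < j)
    (hfg : ∀ a b, i ≤ a → 0 ≤ b → b < j → b - a ≤ j - i - 1 → f a b = g a b) :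
    cellS f temp i j = cellS g temp i j := by
  unfold cellS
  have h1 : f i (j - 1) = g i (j - 1) := hfg i (j - 1) le_rfl (by omega) (by omega) (by omega)
  by_cases he : temp = []
  · simp [he, h1]
  · simp only [if_neg he]
    have hstep : (fun (acc : Int) (k : Int) =>
        if k < i ∨ j < k then max (f i (j - 1)) acc
        else if k = i then (if i = j - 1 then 1 else max (f (i + 1) (j - 1) + 1) acc)
        else if f i (j - 1) ≤ f i (k - 1) + f (k + 1) (j - 1) then
          max (f i (k - 1) + f (k + 1) (j - 1) + 1) acc
        else max acc (f i (j - 1))) = (fun (acc : Int) (k : Int) =>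
        if k < i ∨ j < k then max (g i (j - 1)) acc
        else if k = i then (if i = j - 1 then 1 else max (g (i + 1) (j - 1) + 1) acc)
        else if g i (j - 1) ≤ g i (k - 1) + g (k + 1) (j - 1) then
          max (g i (k - 1) + g (k + 1) (j - 1) + 1) acc
        else max acc (g i (j - 1))) := by
      funext acc k
      by_cases hout : k < i ∨ j < k
      · simp [hout, h1]
      · have hk1 : i ≤ k ∧ k ≤ j := by omega
        by_cases hki : k = i
        · have h2 : f (i + 1) (j - 1) = g (i + 1) (j - 1) :=
            hfg (i + 1) (j - 1) (by omega) (by omega) (by omega) (by omega)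
          simp [hki, h2, show ¬ j < i by omega]
        · have h3 : f i (k - 1) = g i (k - 1) :=
            hfg i (k - 1) le_rfl (by omega) (by omega) (by omega)
          have h4 : f (k + 1) (j - 1) = g (k + 1) (j - 1) :=
            hfg (k + 1) (j - 1) (by omega) (by omega) (by omega) (by omega)
          simp [hout, hki, h1, h3, h4]
    rw [hstep]

-- ---------- the ideal table: dpSpec, defined column-recursively with fuel ----------
def dpS (n : Int) (labels : List String) : Nat → Int → Int → Int
  | 0, _, _ => 0
  | fuel + 1, i, j =>
    if 0 ≤ i ∧ i < j ∧ j ≤ (fuel : Int) then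
      cellS (dpS n labels fuel) (pvTempA n labels j) i j
    else 0

theorem dpS_stable (n : Int) (labels : List String) :
    ∀ (f1 : Nat) (f2 : Nat) (i j : Int), j < (f1 : Int) → j < (f2 : Int) →
      dpS n labels f1 i j = dpS n labels f2 i j := by
  intro f1
  induction f1 with
  | zero =>
    intro f2 i j h1 h2
    cases f2 with
    | zero => rfl
    | succ b => simp only [dpS]; rw [if_neg (by omega)]
  | succ a ih =>
    intro f2 i j h1 h2
    cases f2 with
    | zero => simp only [dpS]; rw [if_neg (by omega)]
    | succ b =>
      simp only [dpS]
      by_cases hg : 0 ≤ i ∧ i < j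
      · rw [if_pos (show 0 ≤ i ∧ i < j ∧ j ≤ (a : Int) by omega),
          if_pos (show 0 ≤ i ∧ i < j ∧ j ≤ (b : Int) by omega)]
        exact cellS_congr hg.1 hg.2 (fun p q hp hq0 hqj _ => ih b p q (by omega) (by omega))
      · rw [if_neg (show ¬ (0 ≤ i ∧ i < j ∧ j ≤ (a : Int)) by omega),
          if_neg (show ¬ (0 ≤ i ∧ i < j ∧ j ≤ (b : Int)) by omega)]

def dpSpec (n : Int) (labels : List String) (i j : Int) : Int :=
  dpS n labels (j.toNat + 1) i j

theorem dpSpec_eq (n : Int) (labels : List String) (i j : Int) :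
    dpSpec n labels i j =
      if 0 ≤ i ∧ i < j then cellS (dpSpec n labels) (pvTempA n labels j) i j else 0 := by
  unfold dpSpec
  show dpS n labels (j.toNat + 1) i j = _
  simp only [dpS]
  by_cases hg : 0 ≤ i ∧ i < j
  · rw [if_pos (show 0 ≤ i ∧ i < j ∧ j ≤ (j.toNat : Int) by omega), if_pos hg]
    exact cellS_congr hg.1 hg.2 (fun p q hp hq0 hqj _ =>
      dpS_stable n labels j.toNat (q.toNat + 1) p q (by omega) (by omega))
  · rw [if_neg (show ¬ (0 ≤ i ∧ i < j ∧ j ≤ (j.toNat : Int)) by omega), if_neg hg]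

theorem dpSpec_zero {n : Int} {labels : List String} {i j : Int} (h : ¬ (0 ≤ i ∧ i < j)) :
    dpSpec n labels i j = 0 := by rw [dpSpec_eq, if_neg h]

-- ---------- table plumbing: pvGet/pvSet on well-formed n×n tables ----------
def WfT (N : Nat) (dp : List (List Int)) : Prop :=
  dp.length = N ∧ ∀ r ∈ dp, r.length = N

theorem pyGetD_nonneg {α : Type} (xs : List α) (i : Int) (d : α) (hi : 0 ≤ i) :
    PySem.List.pyGetD xs i d = (xs[i.toNat]?).getD d := by
  lift i to Nat using hi with n
  simp [PySem.List.pyGetD_natCast, List.getD_eq_getElem?_getD]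

theorem pvGet_nonneg_eq {dp : List (List Int)} {i j : Int} (hi : 0 ≤ i) (hj : 0 ≤ j) :
    pvGet dp i j = ((dp[i.toNat]?).getD [])[j.toNat]?.getD 0 := by
  unfold pvGet
  rw [pyGetD_nonneg _ _ _ hi, pyGetD_nonneg _ _ _ hj]

theorem pvSet_nonneg_eq {dp : List (List Int)} {i j v : Int} (hi : 0 ≤ i) (hj : 0 ≤ j) :
    pvSet dp i j v = dp.set i.toNat (((dp[i.toNat]?).getD []).set j.toNat v) := by
  unfold pvSet
  rw [PySem.List.pySetD_of_nonneg _ _ hi, PySem.List.pySetD_of_nonneg _ _ hj,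
    pyGetD_nonneg _ _ _ hi]

theorem WfT_pvSet {N : Nat} {dp : List (List Int)} (hw : WfT N dp) {i j v : Int}
    (hi : 0 ≤ i) (hiN : i < (N : Int)) (hj : 0 ≤ j) : WfT N (pvSet dp i j v) := by
  obtain ⟨hlen, hrows⟩ := hw
  rw [pvSet_nonneg_eq hi hj]
  refine ⟨by simp [hlen], ?_⟩
  intro r hr
  rcases List.mem_or_eq_of_mem_set hr with h | h
  · exact hrows r h
  · subst h
    rw [List.length_set]
    have hin : i.toNat < dp.length := by omega
    rw [List.getElem?_eq_getElem hin, Option.getD_some]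
    exact hrows _ (List.getElem_mem hin)

theorem pvGet_pvSet {N : Nat} {dp : List (List Int)} (hw : WfT N dp) {i j v : Int}
    (hi : 0 ≤ i) (hiN : i < (N : Int)) (hj : 0 ≤ j) (hjN : j < (N : Int))
    (i' j' : Int) (hi' : 0 ≤ i') (hj' : 0 ≤ j') :
    pvGet (pvSet dp i j v) i' j' = if i' = i ∧ j' = j then v else pvGet dp i' j' := by
  obtain ⟨hlen, hrows⟩ := hw
  have hin : i.toNat < dp.length := by omega
  have hsome : dp[i.toNat]? = some (dp[i.toNat]'hin) := List.getElem?_eq_getElem hin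
  have hrowlen : ((dp[i.toNat]?).getD []).length = N := by
    rw [hsome, Option.getD_some]
    exact hrows _ (List.getElem_mem hin)
  rw [pvSet_nonneg_eq hi hj, pvGet_nonneg_eq hi' hj', pvGet_nonneg_eq hi' hj',
    List.getElem?_set]
  by_cases hii : i' = i
  · subst hii
    rw [if_pos (by omega), if_pos hin]
    simp only [Option.getD_some]
    rw [List.getElem?_set]
    by_cases hjj : j' = j
    · subst hjj
      rw [if_pos (by omega), if_pos (by rw [hrowlen]; omega)]
      simp
    · rw [if_neg (by omega), if_neg (by simp [hjj])]
  · rw [if_neg (by omega), if_neg (by simp [hii])]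

theorem pvGet_replicate (N : Nat) (i j : Int) (hi : 0 ≤ i) (hj : 0 ≤ j) :
    pvGet (List.replicate N (List.replicate N (0 : Int))) i j = 0 := by
  rw [pvGet_nonneg_eq hi hj]
  simp only [List.getElem?_replicate]
  rcases Nat.lt_or_ge i.toNat N with h | h
  · rw [if_pos h]
    simp only [Option.getD_some, List.getElem?_replicate]
    split <;> simp
  · rw [if_neg (by omega)]
    simp

theorem WfT_replicate (N : Nat) : WfT N (List.replicate N (List.replicate N (0 : Int))) := by
  constructor
  · simp
  · intro r hr
    rw [List.eq_of_mem_replicate hr]; simp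

theorem pvGet_getElem {N : Nat} {dp : List (List Int)} (hw : WfT N dp) (a b : Nat)
    (ha : a < N) (hb : b < N) (h1 : a < dp.length) (h2 : b < (dp[a]'h1).length) :
    pvGet dp (a : Int) (b : Int) = (dp[a]'h1)[b]'h2 := by
  rw [pvGet_nonneg_eq (by omega) (by omega)]
  simp only [Int.toNat_natCast]
  rw [List.getElem?_eq_getElem h1]
  simp only [Option.getD_some]
  rw [List.getElem?_eq_getElem h2]
  simp

theorem table_ext {N : Nat} {dp dp' : List (List Int)} (h1 : WfT N dp) (h2 : WfT N dp')
    (h : ∀ i j : Int, 0 ≤ i → i < (N : Int) → 0 ≤ j → j < (N : Int) →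
      pvGet dp i j = pvGet dp' i j) : dp = dp' := by
  have hl1 := h1.1
  have hl2 := h2.1
  apply List.ext_getElem (by omega)
  intro a ha1 ha2
  have hraN : dp[a].length = N := h1.2 _ (List.getElem_mem ha1)
  have hraN' : dp'[a].length = N := h2.2 _ (List.getElem_mem ha2)
  apply List.ext_getElem (by omega)
  intro b hb1 hb2
  rw [← pvGet_getElem h1 a b (by omega) (by omega) ha1 hb1,
    ← pvGet_getElem h2 a b (by omega) (by omega) ha2 hb2]
  exact h a b (by omega) (by omega) (by omega) (by omega)

-- ---------- temp lists: B's positions index gives A's per-column scan ----------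
theorem tempA_eq_filter (n : Int) (labels : List String) (j : Int) :
    pvTempA n labels j = (PySem.List.pyRange 0 n 1).filter
      (fun k => decide (pvLab labels j = pvLab labels k ∧ k ≠ j)) := by
  unfold pvTempA
  simpa using PySem.List.foldl_append_ite_eq_filter
    (fun k => pvLab labels j = pvLab labels k ∧ k ≠ j) (PySem.List.pyRange 0 n 1) []

theorem posB_getD (n : Int) (labels : List String) (q : String) :
    (pvPosB n labels).getD q [] = (PySem.List.pyRange 0 n 1).filter
      (fun k => decide (pvLab labels k = q)) := by
  suffices aux : ∀ (L : List Int) (d : PySem.Dict String (List Int)),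
      (L.foldl (fun d k => d.insert (pvLab labels k) (d.getD (pvLab labels k) [] ++ [k])) d).getD q []
        = d.getD q [] ++ L.filter (fun k => decide (pvLab labels k = q)) by
    simpa [pvPosB, PySem.Dict.getD_empty] using aux (PySem.List.pyRange 0 n 1) PySem.Dict.empty
  intro L
  induction L with
  | nil => intro d; simp
  | cons x xs ih =>
    intro d
    rw [List.foldl_cons, ih, List.filter_cons]
    by_cases hx : pvLab labels x = q
    · simp [hx, PySem.Dict.getD_insert]
    · simp [hx, PySem.Dict.getD_insert, Ne.symm hx]

theorem tempB_eq_tempA (n : Int) (labels : List String) (j : Int) :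
    pvTempB labels (pvPosB n labels) j = pvTempA n labels j := by
  unfold pvTempB
  rw [posB_getD, tempA_eq_filter, List.filter_filter]
  apply List.filter_congr
  intro k _
  by_cases h1 : pvLab labels k = pvLab labels j
  · by_cases h2 : k = j <;> simp [decide_eq_true h1, decide_eq_true h1.symm, h2]
  · simp [h1]
    intro h
    exact absurd h.symm h1

-- ---------- the two fills compute dpSpec ----------
def stepA (n : Int) (labels : List String) (j : Int) (dp : List (List Int)) (i : Int) :
    List (List Int) :=
  pvSet dp i j (pvCellB dp (pvTempA n labels j) i j)

theorem fillA_decomp (n : Int) (labels : List String) :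
    pvFillA n labels = (PySem.List.pyRange 0 n 1).foldl
      (fun dp j => (PySem.List.pyRange 0 j 1).foldl (stepA n labels j) dp)
      (List.replicate n.toNat (List.replicate n.toNat 0)) := rfl

def stepB (n : Int) (labels : List String) (l : Int) (dp : List (List Int)) (i : Int) :
    List (List Int) :=
  pvSet dp i (i + l - 1) (pvCellB dp (pvTempB labels (pvPosB n labels) (i + l - 1)) i (i + l - 1))

theorem fillB_decomp (n : Int) (labels : List String) :
    pvFillB n labels = (PySem.List.pyRange 2 (n + 1) 1).foldl
      (fun dp l => (PySem.List.pyRange 0 (n - l + 1) 1).foldl (stepB n labels l) dp)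
      (List.replicate n.toNat (List.replicate n.toNat 0)) := rfl

-- a table agrees with dpSpec on the region C (and is 0 elsewhere in range)
def TabIs (n : Int) (labels : List String) (C : Int → Int → Prop) [∀ a b, Decidable (C a b)]
    (dp : List (List Int)) : Prop :=
  WfT n.toNat dp ∧ ∀ a b : Int, 0 ≤ a → 0 ≤ b → b < (n.toNat : Int) →
    pvGet dp a b = if C a b then dpSpec n labels a b else 0

theorem TabIs_of_value_eq {n : Int} {labels : List String} {C C' : Int → Int → Prop}
    [∀ a b, Decidable (C a b)] [∀ a b, Decidable (C' a b)] {dp : List (List Int)}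
    (h : TabIs n labels C dp)
    (hv : ∀ a b : Int, 0 ≤ a → 0 ≤ b → b < (n.toNat : Int) →
      (if C a b then dpSpec n labels a b else 0) = (if C' a b then dpSpec n labels a b else 0)) :
    TabIs n labels C' dp :=
  ⟨h.1, fun a b ha hb hbN => by rw [h.2 a b ha hb hbN, hv a b ha hb hbN]⟩

theorem stepA_inv {n : Int} {labels : List String} {m p : Int} {dp : List (List Int)}
    (hm0 : 0 ≤ m) (hmN : m < (n.toNat : Int)) (hp0 : 0 ≤ p) (hpm : p < m)
    (h : TabIs n labels (fun a b => b < m ∨ (b = m ∧ a < p)) dp) :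
    TabIs n labels (fun a b => b < m ∨ (b = m ∧ a < p + 1)) (stepA n labels m dp p) := by
  have h0 : pvGet dp p m = 0 := by
    rw [h.2 p m hp0 hm0 hmN, if_neg (by omega)]
  have hcell : pvCellB dp (pvTempA n labels m) p m = dpSpec n labels p m := by
    rw [cellB_eq_cellS _ _ _ _ h0]
    rw [cellS_congr hp0 hpm (g := dpSpec n labels)
      (fun a b ha hb0 hbm hgap => by
        rw [h.2 a b (by omega) hb0 (by omega), if_pos (by omega)])]
    rw [dpSpec_eq, if_pos ⟨hp0, hpm⟩]
  unfold stepA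
  rw [hcell]
  refine ⟨WfT_pvSet h.1 hp0 (by omega) hm0, ?_⟩
  intro a b ha hb hbN
  rw [pvGet_pvSet h.1 hp0 (by omega) hm0 hmN a b ha hb]
  by_cases hw : a = p ∧ b = m
  · rw [if_pos hw, if_pos (by omega)]
    rw [hw.1, hw.2]
  · rw [if_neg hw, h.2 a b ha hb hbN]
    by_cases hc : b < m ∨ (b = m ∧ a < p)
    · rw [if_pos hc, if_pos (by omega)]
    · rw [if_neg hc, if_neg (by omega)]

theorem innerA {n : Int} {labels : List String} {m : Int}
    (hm0 : 0 ≤ m) (hmN : m < (n.toNat : Int)) :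
    ∀ (p : Nat), (p : Int) ≤ m → ∀ dp, TabIs n labels (fun a b => b < m ∨ (b = m ∧ a < 0)) dp →
      TabIs n labels (fun a b => b < m ∨ (b = m ∧ a < (p : Int)))
        ((PySem.List.pyRange 0 (p : Int) 1).foldl (stepA n labels m) dp) := by
  intro p
  induction p with
  | zero => intro _ dp h; simpa [PySem.List.pyRange_one_eq_nil] using h
  | succ q ih =>
    intro hq dp h
    have hsplit : PySem.List.pyRange 0 ((q : Int) + 1) 1
        = PySem.List.pyRange 0 (q : Int) 1 ++ [(q : Int)] :=
      PySem.List.pyRange_one_succ_right (by omega)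
    rw [show ((q + 1 : Nat) : Int) = (q : Int) + 1 by push_cast; ring, hsplit,
      List.foldl_append, List.foldl_cons, List.foldl_nil]
    exact stepA_inv hm0 hmN (by omega) (by omega) (ih (by omega) dp h)

theorem fillA_spec (n : Int) (labels : List String) :
    TabIs n labels (fun a b => b < (n.toNat : Int)) (pvFillA n labels) := by
  rw [fillA_decomp]
  have hrw : PySem.List.pyRange 0 n 1 = PySem.List.pyRange 0 ((n.toNat : Nat) : Int) 1 := by
    by_cases h : 0 ≤ n
    · rw [Int.toNat_of_nonneg h]
    · rw [PySem.List.pyRange_one_eq_nil (by omega), PySem.List.pyRange_one_eq_nil (by omega)]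
  rw [hrw]
  suffices H : ∀ (q : Nat), q ≤ n.toNat →
      TabIs n labels (fun a b => b < (q : Int))
        ((PySem.List.pyRange 0 (q : Int) 1).foldl
          (fun dp j => (PySem.List.pyRange 0 j 1).foldl (stepA n labels j) dp)
          (List.replicate n.toNat (List.replicate n.toNat 0))) by
    exact H n.toNat le_rfl
  intro q
  induction q with
  | zero =>
    intro _
    rw [PySem.List.pyRange_one_eq_nil (by omega), List.foldl_nil]
    refine ⟨WfT_replicate _, ?_⟩
    intro a b ha hb hbN
    rw [pvGet_replicate _ _ _ ha hb, if_neg (by omega)]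
  | succ q ih =>
    intro hq
    have hsplit : PySem.List.pyRange 0 ((q : Int) + 1) 1
        = PySem.List.pyRange 0 (q : Int) 1 ++ [(q : Int)] :=
      PySem.List.pyRange_one_succ_right (by omega)
    rw [show ((q + 1 : Nat) : Int) = (q : Int) + 1 by push_cast; ring, hsplit,
      List.foldl_append, List.foldl_cons, List.foldl_nil]
    have h1 := ih (by omega)
    have h2 : TabIs n labels (fun a b => b < (q : Int) ∨ (b = (q : Int) ∧ a < 0))
        ((PySem.List.pyRange 0 (q : Int) 1).foldl
          (fun dp j => (PySem.List.pyRange 0 j 1).foldl (stepA n labels j) dp)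
          (List.replicate n.toNat (List.replicate n.toNat 0))) := by
      refine TabIs_of_value_eq h1 ?_
      intro a b ha hb hbN
      by_cases hc : b < (q : Int)
      · rw [if_pos hc, if_pos (by omega)]
      · rw [if_neg hc, if_neg (by omega)]
    have h3 := innerA (n := n) (labels := labels) (m := (q : Int)) (by omega) (by omega)
      q le_rfl _ h2
    refine TabIs_of_value_eq h3 ?_
    intro a b ha hb hbN
    by_cases hc : b < (q : Int) ∨ (b = (q : Int) ∧ a < (q : Int))
    · rw [if_pos hc, if_pos (by omega)]
    · rw [if_neg hc]
      by_cases hc2 : b < (q : Int) + 1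
      · rw [if_pos hc2, dpSpec_zero (by omega)]
      · rw [if_neg hc2]

theorem stepB_inv {n : Int} {labels : List String} {l p : Int} {dp : List (List Int)}
    (hl : 2 ≤ l) (hp0 : 0 ≤ p) (hpn : p + l - 1 < (n.toNat : Int))
    (h : TabIs n labels (fun a b => b - a < l - 1 ∨ (b - a = l - 1 ∧ a < p)) dp) :
    TabIs n labels (fun a b => b - a < l - 1 ∨ (b - a = l - 1 ∧ a < p + 1))
      (stepB n labels l dp p) := by
  have hj0 : 0 ≤ p + l - 1 := by omega
  have h0 : pvGet dp p (p + l - 1) = 0 := by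
    rw [h.2 p (p + l - 1) hp0 hj0 hpn, if_neg (by omega)]
  have hcell : pvCellB dp (pvTempB labels (pvPosB n labels) (p + l - 1)) p (p + l - 1)
      = dpSpec n labels p (p + l - 1) := by
    rw [tempB_eq_tempA, cellB_eq_cellS _ _ _ _ h0]
    rw [cellS_congr hp0 (by omega) (g := dpSpec n labels)
      (fun a b ha hb0 hbm hgap => by
        rw [h.2 a b (by omega) hb0 (by omega), if_pos (by omega)])]
    rw [dpSpec_eq, if_pos ⟨hp0, by omega⟩]
  unfold stepB
  rw [hcell]
  refine ⟨WfT_pvSet h.1 hp0 (by omega) hj0, ?_⟩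
  intro a b ha hb hbN
  rw [pvGet_pvSet h.1 hp0 (by omega) hj0 hpn a b ha hb]
  by_cases hw : a = p ∧ b = p + l - 1
  · rw [if_pos hw, if_pos (by omega)]
    rw [hw.1, hw.2]
  · rw [if_neg hw, h.2 a b ha hb hbN]
    by_cases hc : b - a < l - 1 ∨ (b - a = l - 1 ∧ a < p)
    · rw [if_pos hc, if_pos (by omega)]
    · rw [if_neg hc, if_neg (by omega)]

theorem innerB {n : Int} {labels : List String} {l : Int} (hl : 2 ≤ l) (hln : l ≤ n) :
    ∀ (p : Nat), (p : Int) ≤ n - l + 1 → ∀ dp,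
      TabIs n labels (fun a b => b - a < l - 1 ∨ (b - a = l - 1 ∧ a < 0)) dp →
      TabIs n labels (fun a b => b - a < l - 1 ∨ (b - a = l - 1 ∧ a < (p : Int)))
        ((PySem.List.pyRange 0 (p : Int) 1).foldl (stepB n labels l) dp) := by
  intro p
  induction p with
  | zero => intro _ dp h; simpa [PySem.List.pyRange_one_eq_nil] using h
  | succ q ih =>
    intro hq dp h
    have hsplit : PySem.List.pyRange 0 ((q : Int) + 1) 1
        = PySem.List.pyRange 0 (q : Int) 1 ++ [(q : Int)] :=
      PySem.List.pyRange_one_succ_right (by omega)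
    rw [show ((q + 1 : Nat) : Int) = (q : Int) + 1 by push_cast; ring, hsplit,
      List.foldl_append, List.foldl_cons, List.foldl_nil]
    exact stepB_inv hl (by omega) (by omega) (ih (by omega) dp h)

theorem fillB_spec (n : Int) (labels : List String) :
    TabIs n labels (fun a b => b < (n.toNat : Int)) (pvFillB n labels) := by
  rw [fillB_decomp]
  have hrw : PySem.List.pyRange 2 (n + 1) 1
      = PySem.List.pyRange 2 (2 + ((n - 1).toNat : Int)) 1 := by
    by_cases h : 1 ≤ n
    · congr 1; omega
    · rw [PySem.List.pyRange_one_eq_nil (by omega), PySem.List.pyRange_one_eq_nil (by omega)]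
  rw [hrw]
  suffices H : ∀ (t : Nat), t ≤ (n - 1).toNat →
      TabIs n labels (fun a b => b - a < 1 + (t : Int))
        ((PySem.List.pyRange 2 (2 + (t : Int)) 1).foldl
          (fun dp l => (PySem.List.pyRange 0 (n - l + 1) 1).foldl (stepB n labels l) dp)
          (List.replicate n.toNat (List.replicate n.toNat 0))) by
    have := H (n - 1).toNat le_rfl
    refine TabIs_of_value_eq this ?_
    intro a b ha hb hbN
    rw [if_pos (by omega), if_pos (by omega)]
  intro t
  induction t with
  | zero =>
    intro _
    rw [PySem.List.pyRange_one_eq_nil (by omega), List.foldl_nil]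
    refine ⟨WfT_replicate _, ?_⟩
    intro a b ha hb hbN
    rw [pvGet_replicate _ _ _ ha hb]
    by_cases hc : b - a < 1 + (0 : Int)
    · rw [if_pos (by exact_mod_cast hc), dpSpec_zero (by omega)]
    · rw [if_neg (by exact_mod_cast hc)]
  | succ t ih =>
    intro ht
    have hsplit : PySem.List.pyRange 2 (2 + ((t : Int) + 1)) 1
        = PySem.List.pyRange 2 (2 + (t : Int)) 1 ++ [2 + (t : Int)] := by
      rw [show 2 + ((t : Int) + 1) = (2 + (t : Int)) + 1 by ring]
      exact PySem.List.pyRange_one_succ_right (by omega)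
    rw [show ((t + 1 : Nat) : Int) = (t : Int) + 1 by push_cast; ring, hsplit,
      List.foldl_append, List.foldl_cons, List.foldl_nil]
    have h1 := ih (by omega)
    set l : Int := 2 + (t : Int) with hldef
    have hln : l ≤ n := by omega
    have h2 := TabIs_of_value_eq (C' := fun a b => b - a < l - 1 ∨ (b - a = l - 1 ∧ a < 0)) h1
      (by
        intro a b ha hb hbN
        by_cases hc : b - a < 1 + (t : Int)
        · rw [if_pos hc, if_pos (by omega)]
        · rw [if_neg hc, if_neg (by omega)])
    have hrw2 : PySem.List.pyRange 0 (n - l + 1) 1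
        = PySem.List.pyRange 0 (((n - l + 1).toNat : Nat) : Int) 1 := by
      by_cases h : 0 ≤ n - l + 1
      · rw [Int.toNat_of_nonneg h]
      · rw [PySem.List.pyRange_one_eq_nil (by omega), PySem.List.pyRange_one_eq_nil (by omega)]
    rw [hrw2]
    have h3 := innerB (by omega) hln (n - l + 1).toNat (by omega) _ h2
    refine TabIs_of_value_eq h3 ?_
    intro a b ha hb hbN
    by_cases hc : b - a < l - 1 ∨ (b - a = l - 1 ∧ a < ((n - l + 1).toNat : Int))
    · rw [if_pos hc, if_pos (by omega)]
    · rw [if_neg hc, if_neg (by omega)]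

theorem pv_fill_eq (n : Int) (labels : List String) : pvFillA n labels = pvFillB n labels := by
  have hA := fillA_spec n labels
  have hB := fillB_spec n labels
  refine table_ext hA.1 hB.1 ?_
  intro i j hi hiN hj hjN
  rw [hA.2 i j hi hj hjN, hB.2 i j hi hj hjN]

theorem pvSplitFind_some {labels : List String} {dp : List (List Int)} {i j k : Int}
    (h : pvSplitFind labels dp i j = some k) : i ≤ k ∧ k < j :=
  PySem.List.mem_pyRange_one.mp (List.mem_of_find?_eq_some h)

-- the loop measure of the traceback stack (proof-only)
def pvItemW : pvItem → Nat
  | .iv i j => 5 * (j - i).toNat + 2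
  | .ed _ _ => 1

-- pvChordsA does not depend on the fuel once it exceeds the recursion measure
theorem chords_stable {labels : List String} {dp : List (List Int)} :
    ∀ (f1 f2 : Nat) (i j : Int), (j - i).toNat < f1 → (j - i).toNat < f2 →
      pvChordsA labels dp f1 i j = pvChordsA labels dp f2 i j := by
  intro f1
  induction f1 with
  | zero => intro f2 i j h1 _; omega
  | succ a ih =>
    intro f2 i j h1 h2
    cases f2 with
    | zero => omega
    | succ b =>
      simp only [pvChordsA]
      by_cases hb : i ≥ j
      · rw [if_pos hb, if_pos hb]
      · rw [if_neg hb, if_neg hb]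
        by_cases h3 : pvLab labels i = pvLab labels j
            ∧ pvGet dp i j = pvGet dp (i + 1) (j - 1) + 1
        · rw [if_pos h3, if_pos h3, ih b (i + 1) (j - 1) (by omega) (by omega)]
        · rw [if_neg h3, if_neg h3]
          by_cases h4 : pvGet dp i j = pvGet dp i (j - 1)
          · rw [if_pos h4, if_pos h4, ih b i (j - 1) (by omega) (by omega)]
          · rw [if_neg h4, if_neg h4]
            cases hsf : pvSplitFind labels dp i j with
            | none => rfl
            | some k =>
              have hk := pvSplitFind_some hsf
              dsimp only
              rw [ih b i (k - 1) (by omega) (by omega),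
                ih b (k + 1) (j - 1) (by omega) (by omega)]

-- the flattening of a traceback stack: what the remaining items will emit
def pvFlat (labels : List String) (dp : List (List Int)) : List pvItem → List (Int × Int)
  | [] => []
  | .ed a b :: rest => (a, b) :: pvFlat labels dp rest
  | .iv i j :: rest => pvChordsA labels dp ((j - i).toNat + 1) i j ++ pvFlat labels dp rest

theorem pv_trace_flat (labels : List String) (dp : List (List Int)) :
    ∀ (fuel : Nat) (stack : List pvItem) (res : List (Int × Int)),
      (stack.map pvItemW).sum < fuel →
      pvTrace labels dp fuel stack res = res ++ pvFlat labels dp stack := by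
  intro fuel
  induction fuel with
  | zero => intro stack res h; omega
  | succ f ih =>
    intro stack res h
    match stack with
    | [] => simp [pvTrace, pvFlat]
    | .ed a b :: rest =>
      rw [show pvTrace labels dp (f + 1) (pvItem.ed a b :: rest) res
          = pvTrace labels dp f rest (res ++ [(a, b)]) from rfl]
      rw [ih rest _ (by simp only [List.map_cons, List.map_nil, List.sum_cons, List.sum_nil, pvItemW] at h ⊢; omega)]
      simp [pvFlat]
    | .iv i j :: rest =>
      have hsum : (rest.map pvItemW).sum + 5 * (j - i).toNat + 2 < f + 1 := by
        simpa [pvItemW, Nat.add_comm, Nat.add_left_comm] using h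
      show (if i ≥ j then pvTrace labels dp f rest res
        else if pvLab labels i = pvLab labels j
            ∧ pvGet dp i j = pvGet dp (i + 1) (j - 1) + 1 then
          pvTrace labels dp f (.iv (i + 1) (j - 1) :: rest) (res ++ [(i, j)])
        else if pvGet dp i j = pvGet dp i (j - 1) then
          pvTrace labels dp f (.iv i (j - 1) :: rest) res
        else
          match pvSplitFind labels dp i j with
          | some k =>
              pvTrace labels dp f (.iv i (k - 1) :: .ed k j :: .iv (k + 1) (j - 1) :: rest) res
          | none => pvTrace labels dp f rest res) = res ++ pvFlat labels dp (.iv i j :: rest)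
      by_cases hb : i ≥ j
      · rw [if_pos hb, ih rest res (by omega)]
        have : pvChordsA labels dp ((j - i).toNat + 1) i j = [] := by
          rw [pvChordsA, if_pos hb]
        simp [pvFlat, this]
      · rw [if_neg hb]
        by_cases h3 : pvLab labels i = pvLab labels j
            ∧ pvGet dp i j = pvGet dp (i + 1) (j - 1) + 1
        · rw [if_pos h3, ih (pvItem.iv (i + 1) (j - 1) :: rest) (res ++ [(i, j)])
            (by simp only [List.map_cons, List.sum_cons, pvItemW]; omega)]
          have : pvChordsA labels dp ((j - i).toNat + 1) i j
              = (i, j) :: pvChordsA labels dp ((j - 1 - (i + 1)).toNat + 1) (i + 1) (j - 1) := by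
            rw [pvChordsA, if_neg hb, if_pos h3,
              chords_stable (j - i).toNat ((j - 1 - (i + 1)).toNat + 1) (i + 1) (j - 1)
                (by omega) (by omega)]
          simp [pvFlat, this]
        · rw [if_neg h3]
          by_cases h4 : pvGet dp i j = pvGet dp i (j - 1)
          · rw [if_pos h4, ih (pvItem.iv i (j - 1) :: rest) res
              (by simp only [List.map_cons, List.sum_cons, pvItemW]; omega)]
            have : pvChordsA labels dp ((j - i).toNat + 1) i j
                = pvChordsA labels dp ((j - 1 - i).toNat + 1) i (j - 1) := by
              rw [pvChordsA, if_neg hb, if_neg h3, if_pos h4,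
                chords_stable (j - i).toNat ((j - 1 - i).toNat + 1) i (j - 1)
                  (by omega) (by omega)]
            simp [pvFlat, this]
          · rw [if_neg h4]
            cases hsf : pvSplitFind labels dp i j with
            | none =>
              dsimp only
              rw [ih rest res (by omega)]
              have : pvChordsA labels dp ((j - i).toNat + 1) i j = [] := by
                rw [pvChordsA, if_neg hb, if_neg h3, if_neg h4, hsf]
              simp [pvFlat, this]
            | some k =>
              have hk := pvSplitFind_some hsf
              dsimp only
              rw [ih (pvItem.iv i (k - 1) :: pvItem.ed k j :: pvItem.iv (k + 1) (j - 1) :: rest)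
                res (by simp only [List.map_cons, List.sum_cons, pvItemW]; omega)]
              have : pvChordsA labels dp ((j - i).toNat + 1) i j
                  = pvChordsA labels dp ((k - 1 - i).toNat + 1) i (k - 1)
                    ++ (k, j) :: pvChordsA labels dp ((j - 1 - (k + 1)).toNat + 1) (k + 1) (j - 1) := by
                rw [pvChordsA, if_neg hb, if_neg h3, if_neg h4, hsf]
                dsimp only
                rw [chords_stable (j - i).toNat ((k - 1 - i).toNat + 1) i (k - 1)
                    (by omega) (by omega),
                  chords_stable (j - i).toNat ((j - 1 - (k + 1)).toNat + 1) (k + 1) (j - 1)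
                    (by omega) (by omega)]
              simp [pvFlat, this]

theorem pv_trace_eq (labels : List String) (dp : List (List Int)) (i j : Int) :
    pvTrace labels dp (5 * (j - i).toNat + 3) [.iv i j] []
      = pvChordsA labels dp ((j - i).toNat + 1) i j := by
  rw [pv_trace_flat labels dp _ _ _ (by simp only [List.map_cons, List.map_nil, List.sum_cons, List.sum_nil, pvItemW]; omega)]
  simp [pvFlat]

-- ===== VERDICT (by name: the statement is the Claim_ definition above) =====
theorem maximum_planar_subset_spec : Claim_equal_maximum_planar_subset := by
  intro n labels _ _
  unfold Spec_maximum_planar_subset maximum_planar_subset maximum_planar_subset_alt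
  rw [pv_fill_eq]
  show (pvGet (pvFillB n labels) 0 (n - 1),
      pvChordsA labels (pvFillB n labels) ((n - 1).toNat + 1) 0 (n - 1)) =
    (pvGet (pvFillB n labels) 0 (n - 1),
      pvTrace labels (pvFillB n labels) (5 * (n - 1).toNat + 3) [pvItem.iv 0 (n - 1)] [])
  rw [show (5 : Nat) * (n - 1).toNat + 3 = 5 * (n - 1 - 0).toNat + 3 by norm_num,
    pv_trace_eq labels (pvFillB n labels) 0 (n - 1)]
  norm_num
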